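-- pv_equiv track=rewrite | github.com/MrBrantCode/unitest_baseline | mut_generate/mist_train_taco/taco_9044/solution.py | calculate_coins_earned
-- ===== SOURCE A (Python) =====
-- def calculate_coins_earned(T, N):
--     largest = 1000000000000000000
--     height = [0] * 1000
--     height[0] = 1
--
--     for i in range(1, 261):
--         for j in range(1, int(i ** 0.5) + 1):
--             height[i] += height[i - j * j]
--             if height[i] > largest:
--                 break
--
--     results = []
--     for n in N:
--         for i in range(261):
--             if height[i] >= n:
--                 results.append(i)
--                 break
--
--     return results
-- ===== SOURCE B (Python) =====
-- import bisect
--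
-- def calculate_coins_earned(T, N):
--     largest = 1000000000000000000
--     height = [0] * 1000
--     height[0] = 1
--
--     for i in range(1, 261):
--         for j in range(1, int(i ** 0.5) + 1):
--             height[i] += height[i - j * j]
--             if height[i] > largest:
--                 break
--
--     results = []
--     for n in N:
--         i = bisect.bisect_left(height, n, 0, 261)
--         if i < 261:
--             results.append(i)
--     return results
-- ===== Notes on version B (the rewrite author's own statement) =====
-- stated objective: faster
-- what changed: The per-query linear scan over the precomputed 261-entry non-decreasing height table is replaced by bisect.bisect_left (binary search) confined to indices [0,261); the table precompute is unchanged.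
import Mathlib
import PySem

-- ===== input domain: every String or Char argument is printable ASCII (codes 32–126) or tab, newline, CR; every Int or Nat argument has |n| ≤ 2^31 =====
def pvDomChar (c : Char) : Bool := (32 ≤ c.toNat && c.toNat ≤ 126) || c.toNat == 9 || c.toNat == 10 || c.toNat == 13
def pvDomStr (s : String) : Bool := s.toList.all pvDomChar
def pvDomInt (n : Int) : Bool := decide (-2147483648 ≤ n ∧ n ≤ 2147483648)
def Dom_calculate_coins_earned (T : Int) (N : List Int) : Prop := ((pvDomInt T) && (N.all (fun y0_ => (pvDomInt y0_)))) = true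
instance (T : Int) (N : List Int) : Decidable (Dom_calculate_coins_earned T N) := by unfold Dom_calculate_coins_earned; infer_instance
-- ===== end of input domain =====

-- B replaces A's per-query linear scan of the precomputed 261-entry monotone table by a
-- binary search (bisect_left); the table precompute is identical in both programs.

-- ===== PORT A =====
-- shared precompute helpers: both Pythons build the same `height` table with the same loops
-- int(i ** 0.5): exact for 0 ≤ i ≤ 260, ported as an integer square root computed by scan
def pvISqrt (n : Nat) : Nat := (List.range (n + 1)).foldl (fun a j => if j * j ≤ n then j else a) 0

def pvLargest : Int := 1000000000000000000

-- inner loop 'for j in range(1, int(i**0.5)+1): height[i] += height[i-j*j]; if > largest: break'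
-- (all indices are provably in range, so List.set/getD are exact for the Python list ops)
def pvInner (h : List Int) (i : Nat) : List Nat → List Int
  | [] => h
  | j :: js =>
    let h' := h.set i (h.getD i 0 + h.getD (i - j * j) 0)
    if h'.getD i 0 > pvLargest then h' else pvInner h' i js

-- outer loop 'for i in range(1, 261)'
def pvOuter (h : List Int) : List Nat → List Int
  | [] => h
  | i :: is => pvOuter (pvInner h i (List.range' 1 (pvISqrt i))) is

-- height = [0]*1000; height[0] = 1; then the two loops
def pvHeight : List Int := pvOuter ((List.replicate 1000 (0:Int)).set 0 1) (List.range' 1 260)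

-- A's per-query loop 'for i in range(261): if height[i] >= n: append i; break'
def pvScan (h : List Int) (n : Int) (i : Nat) : Option Nat :=
  if _h : i < 261 then (if n ≤ h.getD i 0 then some i else pvScan h n (i + 1)) else none
termination_by 261 - i

def calculate_coins_earned (T : Int) (N : List Int) : List Int :=
  N.foldl (fun acc n =>
    match pvScan pvHeight n 0 with
    | some i => acc ++ [(i : Int)]
    | none => acc) []

-- ===== PORT B =====
-- bisect.bisect_left(height, x, lo, hi)
def pvBisect (h : List Int) (x : Int) (lo hi : Nat) : Nat :=
  if _h : lo < hi then
    let mid := (lo + hi) / 2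
    if h.getD mid 0 < x then pvBisect h x (mid + 1) hi else pvBisect h x lo mid
  else lo
termination_by hi - lo

def calculate_coins_earned_alt (T : Int) (N : List Int) : List Int :=
  N.foldl (fun acc n =>
    let i := pvBisect pvHeight n 0 261
    if i < 261 then acc ++ [(i : Int)] else acc) []

-- ===== PRECONDITION & SPEC =====
def Spec_calculate_coins_earned (T : Int) (N : List Int) (out : List Int) : Prop := out = calculate_coins_earned_alt T N
instance (T : Int) (N : List Int) (out : List Int) : Decidable (Spec_calculate_coins_earned T N out) := by unfold Spec_calculate_coins_earned; infer_instance

-- ===== CLAIM (what is proved, stated in full; the proofs are below) =====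
def Claim_equal_calculate_coins_earned : Prop := ∀ (T : Int) (N : List Int), Dom_calculate_coins_earned T N → Spec_calculate_coins_earned T N (calculate_coins_earned T N)

-- ===== LEMMAS AND PROOFS =====

-- adjacent-pairs check, evaluated once by the kernel on the concrete table
def chainLE : List Int → Bool
  | [] => true
  | [_] => true
  | a :: b :: t => (a ≤ b : Bool) && chainLE (b :: t)

set_option maxRecDepth 100000 in
set_option maxHeartbeats 2000000 in
theorem chain_ok : (chainLE (pvHeight.take 261) && (pvHeight.length == 1000)) = true := by decide

theorem chainLE_getD (l : List Int) (h : chainLE l = true) :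
    ∀ i, i + 1 < l.length → l.getD i 0 ≤ l.getD (i + 1) 0 := by
  induction l with
  | nil => intro i hi; simp at hi
  | cons a t ih =>
    cases t with
    | nil => intro i hi; simp at hi
    | cons b t' =>
      simp only [chainLE, Bool.and_eq_true, decide_eq_true_eq] at h
      intro i hi
      cases i with
      | zero => simpa [List.getD] using h.1
      | succ i =>
        have := ih h.2 i (by simpa using hi)
        simpa [List.getD] using this

theorem height_len : pvHeight.length = 1000 := by
  have := chain_ok
  simp only [Bool.and_eq_true, beq_iff_eq] at this
  exact this.2

theorem getD_take (l : List Int) (n i : Nat) (h : i < n) :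
    (l.take n).getD i 0 = l.getD i 0 := by
  simp [List.getD_eq_getElem?_getD, h]

theorem mono_step : ∀ i, i < 260 → pvHeight.getD i 0 ≤ pvHeight.getD (i + 1) 0 := by
  intro i hi
  have hc : chainLE (pvHeight.take 261) = true := by
    have := chain_ok
    simp only [Bool.and_eq_true] at this
    exact this.1
  have hl : (pvHeight.take 261).length = 261 := by
    simp [height_len]
  have := chainLE_getD _ hc i (by omega)
  rwa [getD_take _ _ _ (by omega), getD_take _ _ _ (by omega)] at this

theorem mono : ∀ i j, i ≤ j → j ≤ 260 → pvHeight.getD i 0 ≤ pvHeight.getD j 0 := by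
  intro i j hij
  induction j, hij using Nat.le_induction with
  | base => intro _; exact le_refl _
  | succ m him ih =>
    intro hm
    exact le_trans (ih (by omega)) (mono_step m (by omega))

theorem scan_skip (n : Int) : ∀ i j, i ≤ j → j ≤ 261 →
    (∀ k, i ≤ k → k < j → pvHeight.getD k 0 < n) →
    pvScan pvHeight n i = pvScan pvHeight n j := by
  intro i j hij
  induction j, hij using Nat.le_induction with
  | base => intro _ _; rfl
  | succ m him ih =>
    intro hm hlt
    have h1 : pvScan pvHeight n i = pvScan pvHeight n m :=
      ih (by omega) (fun k hk1 hk2 => hlt k hk1 (by omega))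
    rw [h1, pvScan]
    have hm261 : m < 261 := by omega
    have hno : ¬ n ≤ pvHeight.getD m 0 := by
      have := hlt m him (by omega); omega
    rw [dif_pos hm261, if_neg hno]

theorem bisect_scan (n : Int) : ∀ d lo hi, hi - lo = d → lo ≤ hi → hi ≤ 261 →
    (∀ k, hi ≤ k → k < 261 → n ≤ pvHeight.getD k 0) →
    pvScan pvHeight n lo =
      (if pvBisect pvHeight n lo hi < 261 then some (pvBisect pvHeight n lo hi) else none) := by
  intro d
  induction d using Nat.strong_induction_on with
  | _ d ih =>
    intro lo hi hd hle h261 hinv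
    by_cases hlh : lo < hi
    · rw [pvBisect]
      simp only [hlh, dif_pos]
      set mid := (lo + hi) / 2 with hmid
      have hm1 : lo ≤ mid := by omega
      have hm2 : mid < hi := by omega
      by_cases hcmp : pvHeight.getD mid 0 < n
      · simp only [hcmp, if_pos]
        have hskip : pvScan pvHeight n lo = pvScan pvHeight n (mid + 1) := by
          apply scan_skip n lo (mid + 1) (by omega) (by omega)
          intro k hk1 hk2
          exact lt_of_le_of_lt (mono k mid (by omega) (by omega)) hcmp
        rw [hskip]
        exact ih (hi - (mid + 1)) (by omega) (mid + 1) hi rfl (by omega) h261 hinv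
      · simp only [hcmp, if_false]
        apply ih (mid - lo) (by omega) lo mid rfl (by omega) (by omega)
        intro k hk1 hk2
        exact le_trans ((not_lt.mp hcmp)) (mono mid k hk1 (by omega))
    · rw [pvBisect]
      simp only [hlh, dif_neg, not_false_iff]
      have hlohi : lo = hi := by omega
      by_cases hlo : lo < 261
      · have hn : n ≤ pvHeight.getD lo 0 := hinv lo (by omega) hlo
        rw [pvScan, dif_pos hlo, if_pos hn, if_pos hlo]
      · rw [pvScan, dif_neg hlo, if_neg hlo]

theorem per_query (n : Int) :
    pvScan pvHeight n 0 =
      (if pvBisect pvHeight n 0 261 < 261 then some (pvBisect pvHeight n 0 261) else none) :=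
  bisect_scan n 261 0 261 rfl (by omega) (le_refl _) (fun k hk1 hk2 => absurd hk2 (by omega))

theorem fold_eq : ∀ (N : List Int) (acc : List Int),
    N.foldl (fun acc n =>
      match pvScan pvHeight n 0 with
      | some i => acc ++ [(i : Int)]
      | none => acc) acc =
    N.foldl (fun acc n =>
      let i := pvBisect pvHeight n 0 261
      if i < 261 then acc ++ [(i : Int)] else acc) acc := by
  intro N
  induction N with
  | nil => intro acc; rfl
  | cons n t ih =>
    intro acc
    simp only [List.foldl_cons]
    rw [per_query n]
    by_cases hc : pvBisect pvHeight n 0 261 < 261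
    · simp only [hc, if_pos]
      exact ih _
    · simp only [hc, if_false]
      exact ih _

-- ===== VERDICT (by name: the statement is the Claim_ definition above) =====
theorem calculate_coins_earned_spec : Claim_equal_calculate_coins_earned := by
  intro T N _
  unfold Spec_calculate_coins_earned calculate_coins_earned calculate_coins_earned_alt
  exact fold_eq N []
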